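-- pv_equiv track=rewrite | github.com/tjtharrison/github-actions-docs | src/main.py | find_action_docs_markers
-- ===== SOURCE A (Python) =====
-- def find_action_docs_markers(file_contents):
--     """
--     Find BEGIN and END action docs markers in file contents.
--
--     Args:
--         file_contents: List of lines from the file
--
--     Returns:
--         tuple: (found_start, found_end) boolean tuple
--     """
--     found_start = False
--     found_end = False
--
--     for line in file_contents:
--         if line.startswith("<!-- BEGIN_ACTION_DOCS -->"):
--             found_start = True
--         elif line.startswith("<!-- END_ACTION_DOCS -->"):
--             found_end = True
--
--     return found_start, found_end
-- ===== SOURCE B (Python) =====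
-- def find_action_docs_markers(file_contents):
--     found_start = any(line.startswith("<!-- BEGIN_ACTION_DOCS -->") for line in file_contents)
--     found_end = any(line.startswith("<!-- END_ACTION_DOCS -->") for line in file_contents)
--     return found_start, found_end
-- ===== Notes on version B (the rewrite author's own statement) =====
-- stated objective: idiomatic
-- what changed: Replaces the single fused loop with two mutable flags by two independent short-circuiting any() scans, one per marker.
import Mathlib
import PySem

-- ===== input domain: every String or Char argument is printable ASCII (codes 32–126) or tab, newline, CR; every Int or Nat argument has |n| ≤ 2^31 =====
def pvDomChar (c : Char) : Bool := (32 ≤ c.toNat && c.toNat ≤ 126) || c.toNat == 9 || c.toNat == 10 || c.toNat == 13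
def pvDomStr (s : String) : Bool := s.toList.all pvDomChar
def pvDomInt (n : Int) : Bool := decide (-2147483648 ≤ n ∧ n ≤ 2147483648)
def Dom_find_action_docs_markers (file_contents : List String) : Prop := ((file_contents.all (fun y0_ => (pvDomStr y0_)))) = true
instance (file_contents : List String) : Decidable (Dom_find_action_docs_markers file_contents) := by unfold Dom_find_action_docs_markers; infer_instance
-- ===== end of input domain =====

-- ===== PORT A =====
-- B replaces A's single fused loop with two independent any() scans (idiomatic decomposition; same cost).
def find_action_docs_markers (file_contents : List String) : Bool × Bool :=
  file_contents.foldl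
    (fun st line =>
      if PySem.Str.startswith line "<!-- BEGIN_ACTION_DOCS -->" then (true, st.2)
      else if PySem.Str.startswith line "<!-- END_ACTION_DOCS -->" then (st.1, true)
      else st)
    (false, false)

-- ===== PORT B =====
def find_action_docs_markers_alt (file_contents : List String) : Bool × Bool :=
  (file_contents.any (fun line => PySem.Str.startswith line "<!-- BEGIN_ACTION_DOCS -->"),
   file_contents.any (fun line => PySem.Str.startswith line "<!-- END_ACTION_DOCS -->"))

-- ===== PRECONDITION & SPEC =====
def Spec_find_action_docs_markers (file_contents : List String) (out : Bool × Bool) : Prop := out = find_action_docs_markers_alt file_contents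
instance (file_contents : List String) (out : Bool × Bool) : Decidable (Spec_find_action_docs_markers file_contents out) := by unfold Spec_find_action_docs_markers; infer_instance

-- ===== CLAIM (what is proved, stated in full; the proofs are below) =====
def Claim_equal_find_action_docs_markers : Prop := ∀ (file_contents : List String), Dom_find_action_docs_markers file_contents → Spec_find_action_docs_markers file_contents (find_action_docs_markers file_contents)

-- ===== LEMMAS AND PROOFS =====

-- No line starts with both markers (they diverge at index 5).
theorem pv_not_both (s : String) (h : PySem.Str.startswith s "<!-- BEGIN_ACTION_DOCS -->" = true) :
    PySem.Str.startswith s "<!-- END_ACTION_DOCS -->" = false := by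
  by_contra hne
  have h2 : PySem.Str.startswith s "<!-- END_ACTION_DOCS -->" = true := by
    cases hq : PySem.Str.startswith s "<!-- END_ACTION_DOCS -->" <;> simp_all
  rw [PySem.Str.startswith_eq] at h h2
  rw [PySem.Chars.startswith_iff] at h h2
  rcases List.prefix_or_prefix_of_prefix h h2 with hp | hp <;> revert hp <;> decide

theorem pv_foldl_eq (l : List String) (s e : Bool) :
    l.foldl
      (fun st line =>
        if PySem.Str.startswith line "<!-- BEGIN_ACTION_DOCS -->" then (true, st.2)
        else if PySem.Str.startswith line "<!-- END_ACTION_DOCS -->" then (st.1, true)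
        else st)
      (s, e)
    = (s || l.any (fun line => PySem.Str.startswith line "<!-- BEGIN_ACTION_DOCS -->"),
       e || l.any (fun line => PySem.Str.startswith line "<!-- END_ACTION_DOCS -->")) := by
  induction l generalizing s e with
  | nil => simp
  | cons a t ih =>
    by_cases hb : PySem.Str.startswith a "<!-- BEGIN_ACTION_DOCS -->" = true
    · have he := pv_not_both a hb
      simp only [List.foldl_cons, hb, he, Bool.false_eq_true, if_true, if_false, ite_true,
        ite_false, ih, List.any_cons]
      simp [hb, he]
    · by_cases hq : PySem.Str.startswith a "<!-- END_ACTION_DOCS -->" = true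
      · simp only [List.foldl_cons, hb, hq, if_true, if_false, ite_true, ite_false, ih,
          List.any_cons]
        simp [hb, hq]
      · simp only [List.foldl_cons, hb, hq, if_true, if_false, ite_true, ite_false, ih,
          List.any_cons, Bool.false_eq_true]
        simp [hb, hq]

-- ===== VERDICT (by name: the statement is the Claim_ definition above) =====
theorem find_action_docs_markers_spec : Claim_equal_find_action_docs_markers := by
  intro fc _
  show _ = _
  unfold find_action_docs_markers find_action_docs_markers_alt
  rw [pv_foldl_eq]
  simp
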